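-- pv_equiv track=rewrite | github.com/hongye-zhang/public-texteditor | test files/section_editor.py | _extract_diff
-- ===== SOURCE A (Python) =====
-- def _extract_diff(response: str) -> str:
--     """Extract the diff from the response."""
--     # Split the response into lines
--     lines = response.split('\n')
--
--     # Find the start of the diff
--     diff_start = None
--     for i, line in enumerate(lines):
--         if line.startswith('---'):
--             diff_start = i
--             break
--
--     # If no diff is found, return an empty string
--     if diff_start is None:
--         return ''
--
--     # Extract the diff
--     diff = '\n'.join(lines[diff_start:])
--
--     return diff
-- ===== SOURCE B (Python) =====
-- def _extract_diff(response: str) -> str: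
--     """Extract the diff from the response."""
--     # The diff starts at the first line beginning with '---': that is offset 0
--     # if the response itself starts with '---', else just after the first
--     # occurrence of '\n---'; the joined tail of the split equals the substring
--     # from that line's character offset.
--     if response.startswith('---'):
--         return response
--     p = response.find('\n---')
--     if p == -1:
--         return ''
--     return response[p + 1:]
-- ===== Notes on version B (the rewrite author's own statement) =====
-- stated objective: simpler
-- what changed: Replaces the split('\n')/enumerate/join pipeline with a single substring search on the raw string (startswith at offset 0, else find('\n---')) and one slice.
import Mathlib
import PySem

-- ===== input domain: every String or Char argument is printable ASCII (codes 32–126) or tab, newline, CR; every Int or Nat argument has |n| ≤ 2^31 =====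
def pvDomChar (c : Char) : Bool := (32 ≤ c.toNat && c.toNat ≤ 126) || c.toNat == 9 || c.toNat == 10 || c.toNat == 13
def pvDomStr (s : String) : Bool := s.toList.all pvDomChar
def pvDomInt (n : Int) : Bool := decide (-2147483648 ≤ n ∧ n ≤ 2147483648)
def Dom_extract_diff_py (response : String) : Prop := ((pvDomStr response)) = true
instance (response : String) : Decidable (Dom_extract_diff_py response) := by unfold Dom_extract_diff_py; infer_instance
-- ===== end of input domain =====

-- B replaces A's split('\n')/enumerate/join pipeline by a single substring search on the raw
-- string (startswith at offset 0, else find('\n---') and slice); objective: simpler.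

-- ===== PORT A =====
-- A's 'for i, line in enumerate(lines): if line.startswith("---"): diff_start = i; break'
def pvFirstIdx (ls : List (List Char)) (i : Nat) : Option Nat :=
  match ls with
  | [] => none
  | l :: rest => if PySem.Chars.startswith l ['-','-','-'] then some i else pvFirstIdx rest (i+1)

-- body of A on code points (PySem.Str.* are thin wrappers over PySem.Chars.* on .toList)
def pvExtractA (cs : List Char) : List Char :=
  let lines := PySem.Chars.splitOn cs ['\n']        -- response.split('\n')
  match pvFirstIdx lines 0 with
  | none => []                                      -- no diff found: return ''
  | some i => PySem.Chars.join ['\n'] (PySem.List.slice lines (some (i : Int)) none)  -- '\n'.join(lines[diff_start:])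

def extract_diff_py (response : String) : String := String.ofList (pvExtractA response.toList)

-- ===== PORT B =====
def pvExtractB (cs : List Char) : List Char :=
  if PySem.Chars.startswith cs ['-','-','-'] then cs              -- response.startswith('---')
  else
    let p := PySem.Chars.find cs ['\n','-','-','-']               -- response.find('\n---')
    if p = -1 then [] else PySem.Chars.slice cs (some (p+1)) none -- response[p+1:]

def extract_diff_py_alt (response : String) : String := String.ofList (pvExtractB response.toList)

-- ===== PRECONDITION & SPEC =====
def Spec_extract_diff_py (response : String) (out : String) : Prop := out = extract_diff_py_alt response
instance (response : String) (out : String) : Decidable (Spec_extract_diff_py response out) := by unfold Spec_extract_diff_py; infer_instance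

-- ===== CLAIM (what is proved, stated in full; the proofs are below) =====
def Claim_equal_extract_diff_py : Prop := ∀ (response : String), Dom_extract_diff_py response → Spec_extract_diff_py response (extract_diff_py response)

-- ===== LEMMAS AND PROOFS =====

-- the lines of cs, split at every '\n' (structural-recursion characterisation of split('\n'))
def pvLines : List Char → List (List Char)
  | [] => [[]]
  | c :: rest =>
    if c = '\n' then [] :: pvLines rest
    else
      match pvLines rest with
      | l :: ls => (c :: l) :: ls
      | [] => [[c]]

theorem pvLines_ne_nil (cs : List Char) : pvLines cs ≠ [] := by
  match cs with
  | [] => simp [pvLines]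
  | c :: rest =>
    simp only [pvLines]
    split
    · simp
    · split <;> simp

theorem pv_modifyHead_triv {α : Type} (l : List α) : List.modifyHead (fun x => x) l = l := by
  cases l <;> simp

theorem pv_go_eq (fuel : Nat) : ∀ (l cur : List Char) (acc : List (List Char)), l.length ≤ fuel →
    PySem.Chars.splitOn.go ['\n'] fuel l cur acc = acc.reverse ++ (pvLines l).modifyHead (cur.reverse ++ ·) := by
  induction fuel with
  | zero =>
    intro l cur acc hl
    have : l = [] := by cases l <;> simp_all
    subst this
    simp [PySem.Chars.splitOn.go, pvLines]
  | succ n ih =>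
    intro l cur acc hl
    match l with
    | [] => simp [PySem.Chars.splitOn.go, pvLines]
    | c :: rest =>
      rw [PySem.Chars.splitOn.go]
      by_cases hc : c = '\n'
      · subst hc
        simp only [List.isPrefixOf, beq_self_eq_true, Bool.and_self, if_pos, List.length_cons,
          List.drop_succ_cons, List.length_nil, List.drop_zero]
        rw [ih rest [] _ (by simpa using hl)]
        simp [pvLines, pv_modifyHead_triv]
      · have hpre : (['\n'] : List Char).isPrefixOf (c :: rest) = false := by
          simp [List.isPrefixOf]
          intro h; exact absurd h.symm hc
        simp only [hpre, Bool.false_eq_true, if_false]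
        rw [ih rest (c :: cur) acc (by simpa using hl)]
        simp only [pvLines, hc, if_false]
        rcases hl' : pvLines rest with _ | ⟨l0, ls⟩
        · exact absurd hl' (pvLines_ne_nil rest)
        · simp

theorem pv_splitOn_eq_lines (cs : List Char) : PySem.Chars.splitOn cs ['\n'] = pvLines cs := by
  rw [PySem.Chars.splitOn, pv_go_eq (cs.length + 1) cs [] [] (by omega)]
  simp [pv_modifyHead_triv]

theorem pv_join_lines (cs : List Char) : PySem.Chars.join ['\n'] (pvLines cs) = cs := by
  induction cs with
  | nil => simp [pvLines, PySem.Chars.join_singleton]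
  | cons c rest ih =>
    simp only [pvLines]
    by_cases hc : c = '\n'
    · subst hc
      rw [if_pos rfl]
      rcases hl : pvLines rest with _ | ⟨l0, ls⟩
      · exact absurd hl (pvLines_ne_nil rest)
      · rw [PySem.Chars.join_cons_cons, ← hl, ih]
        simp
    · rw [if_neg hc]
      rcases hl : pvLines rest with _ | ⟨l0, ls⟩
      · exact absurd hl (pvLines_ne_nil rest)
      · rw [hl] at ih
        cases ls with
        | nil => simpa [PySem.Chars.join_singleton] using congrArg (c :: ·) ih
        | cons l1 ls' =>
          rw [PySem.Chars.join_cons_cons] at ih ⊢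
          simp [← ih]

theorem pvLines_no_nl (cs : List Char) (h : '\n' ∉ cs) : pvLines cs = [cs] := by
  induction cs with
  | nil => simp [pvLines]
  | cons c rest ih =>
    have hc : c ≠ '\n' := fun e => h (by simp [e])
    have hr : '\n' ∉ rest := fun m => h (List.mem_cons_of_mem _ m)
    simp only [pvLines, if_neg hc, ih hr]

theorem pvLines_append (h r : List Char) (hh : '\n' ∉ h) :
    pvLines (h ++ '\n' :: r) = h :: pvLines r := by
  induction h with
  | nil => simp [pvLines]
  | cons c t ih =>
    have hc : c ≠ '\n' := fun e => hh (by simp [e])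
    have ht : '\n' ∉ t := fun m => hh (List.mem_cons_of_mem _ m)
    simp only [List.cons_append, pvLines, if_neg hc, ih ht]

theorem pv_find_eq (cs sub : List Char) (k : Nat)
    (h1 : sub <+: cs.drop k) (h2 : ∀ i < k, ¬ sub <+: cs.drop i) :
    PySem.Chars.find cs sub = (k : Int) := by
  have hin : sub <:+: cs :=
    (PySem.Chars.isIn_iff_infix sub cs).1 ((PySem.Chars.exists_prefix_drop_iff_isIn sub cs).1 ⟨k, h1⟩)
  have hnn : 0 ≤ PySem.Chars.find cs sub := (PySem.Chars.find_nonneg_iff cs sub).2 hin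
  obtain ⟨hp, hmin⟩ := PySem.Chars.find_spec hnn
  have hk : (PySem.Chars.find cs sub).toNat = k := by
    rcases lt_trichotomy (PySem.Chars.find cs sub).toNat k with h | h | h
    · exact absurd hp (h2 _ h)
    · exact h
    · exact absurd h1 (hmin k h)
  omega

theorem pv_find_neg (cs sub : List Char) (h : ∀ i, ¬ sub <+: cs.drop i) :
    PySem.Chars.find cs sub = -1 := by
  refine (PySem.Chars.find_eq_neg_one_iff cs sub).2 (fun hinf => ?_)
  obtain ⟨j, hj⟩ := (PySem.Chars.exists_prefix_drop_iff_isIn sub cs).2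
    ((PySem.Chars.isIn_iff_infix sub cs).2 hinf)
  exact h j hj

-- a prefix starting with '\n' cannot start strictly inside the '\n'-free part h
theorem pv_prefix_lt (h r sub : List Char) (hh : '\n' ∉ h) (i : Nat) (hi : i < h.length) :
    ¬ ('\n' :: sub) <+: (h ++ '\n' :: r).drop i := by
  intro hp
  rw [List.drop_append, (by omega : i - h.length = 0), List.drop_zero] at hp
  rcases hd : h.drop i with _ | ⟨a, t⟩
  · have := congrArg List.length hd; simp at this; omega
  · rw [hd, List.cons_append, List.cons_prefix_cons] at hp
    exact hh (hp.1 ▸ (List.drop_suffix i h).subset (hd ▸ List.mem_cons_self))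

theorem pv_prefix_at (h r sub : List Char) :
    ('\n' :: sub) <+: (h ++ '\n' :: r).drop h.length ↔ sub <+: r := by
  rw [List.drop_left, List.cons_prefix_cons]
  simp

theorem pv_drop_past (h r : List Char) (j : Nat) :
    (h ++ '\n' :: r).drop (h.length + 1 + j) = r.drop j := by
  rw [List.drop_append]
  have : h.length + 1 + j - h.length = j + 1 := by omega
  rw [this]
  simp [List.drop_of_length_le (by omega : h.length ≤ h.length + 1 + j)]

theorem pv_sw_append (h r : List Char) (hh : '\n' ∉ h) :
    PySem.Chars.startswith (h ++ '\n' :: r) ['-','-','-'] = PySem.Chars.startswith h ['-','-','-'] := by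
  have hnl : ('\n' : Char) ≠ '-' := by decide
  match h with
  | [] =>
    simp only [List.nil_append]
    rw [Bool.eq_iff_iff, PySem.Chars.startswith_iff, PySem.Chars.startswith_iff]
    simp [List.cons_prefix_cons]
  | [a] =>
    rw [Bool.eq_iff_iff, PySem.Chars.startswith_iff, PySem.Chars.startswith_iff]
    simp [List.cons_prefix_cons]
  | [a, b] =>
    rw [Bool.eq_iff_iff, PySem.Chars.startswith_iff, PySem.Chars.startswith_iff]
    simp [List.cons_prefix_cons]
  | a :: b :: c :: t =>
    rw [Bool.eq_iff_iff, PySem.Chars.startswith_iff, PySem.Chars.startswith_iff]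
    simp [List.cons_prefix_cons]

theorem pv_firstIdx_shift (ls : List (List Char)) (n : Nat) :
    pvFirstIdx ls n = (pvFirstIdx ls 0).map (· + n) := by
  induction ls generalizing n with
  | nil => simp [pvFirstIdx]
  | cons l rest ih =>
    simp only [pvFirstIdx]
    split
    · simp
    · rw [ih (n+1), ih 1]
      cases pvFirstIdx rest 0
      · simp
      · simp
        omega

theorem pvA_step (h r : List Char) (hh : '\n' ∉ h) :
    pvExtractA (h ++ '\n' :: r) =
      if PySem.Chars.startswith h ['-','-','-'] then h ++ '\n' :: r else pvExtractA r := by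
  unfold pvExtractA
  rw [pv_splitOn_eq_lines, pv_splitOn_eq_lines, pvLines_append h r hh]
  simp only [pvFirstIdx]
  by_cases hsw : PySem.Chars.startswith h ['-','-','-']
  · rw [if_pos hsw, if_pos hsw]
    show PySem.Chars.join ['\n'] (PySem.List.slice (h :: pvLines r) (some ((0 : Nat) : Int)) none) = h ++ '\n' :: r
    rw [PySem.List.slice_from_natCast, List.drop_zero, ← pvLines_append h r hh, pv_join_lines]
  · rw [if_neg hsw, if_neg hsw, pv_firstIdx_shift (pvLines r) 1]
    rcases hfi : pvFirstIdx (pvLines r) 0 with _ | i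
    · simp
    · simp only [Option.map_some]
      rw [PySem.List.slice_from_natCast, PySem.List.slice_from_natCast, List.drop_succ_cons]

theorem pvB_step (h r : List Char) (hh : '\n' ∉ h) :
    pvExtractB (h ++ '\n' :: r) =
      if PySem.Chars.startswith h ['-','-','-'] then h ++ '\n' :: r else pvExtractB r := by
  unfold pvExtractB
  rw [pv_sw_append h r hh]
  by_cases hsw : PySem.Chars.startswith h ['-','-','-']
  · rw [if_pos hsw, if_pos hsw]
  · rw [if_neg hsw, if_neg hsw]
    by_cases hr : PySem.Chars.startswith r ['-','-','-']
    · -- first occurrence of "\n---" is at index h.length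
      have hfind : PySem.Chars.find (h ++ '\n' :: r) ['\n','-','-','-'] = (h.length : Int) := by
        apply pv_find_eq
        · exact (pv_prefix_at h r ['-','-','-']).2 ((PySem.Chars.startswith_iff r _).1 hr)
        · exact fun i hi => pv_prefix_lt h r _ hh i hi
      rw [hfind, if_pos hr]
      rw [if_neg (by omega : (h.length : Int) ≠ -1)]
      rw [PySem.Chars.slice_eq_listSlice,
        (by push_cast; ring : (h.length : Int) + 1 = ((h.length + 1 : Nat) : Int)),
        PySem.List.slice_from_natCast]
      have := pv_drop_past h r 0
      simp only [Nat.add_zero, List.drop_zero] at this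
      rw [this]
    · rw [if_neg hr]
      by_cases hq : PySem.Chars.find r ['\n','-','-','-'] = -1
      · -- no occurrence anywhere
        have hnone : ∀ i, ¬ ('\n' :: ['-','-','-']) <+: (h ++ '\n' :: r).drop i := by
          intro i hp
          rcases lt_trichotomy i h.length with hi | hi | hi
          · exact pv_prefix_lt h r _ hh i hi hp
          · subst hi
            exact hr ((PySem.Chars.startswith_iff r _).2 ((pv_prefix_at h r _).1 hp))
          · have hj : i = h.length + 1 + (i - h.length - 1) := by omega
            rw [hj, pv_drop_past] at hp
            exact ((PySem.Chars.find_eq_neg_one_iff r _).1 hq)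
              ((PySem.Chars.isIn_iff_infix _ _).1
                ((PySem.Chars.exists_prefix_drop_iff_isIn _ _).1 ⟨_, hp⟩))
        rw [pv_find_neg _ _ hnone, if_pos rfl, if_pos hq]
      · -- occurrence inside r at q = find r "\n---"
        have hnn : 0 ≤ PySem.Chars.find r ['\n','-','-','-'] := by
          have := PySem.Chars.neg_one_le_find r ['\n','-','-','-']
          omega
        obtain ⟨hp, hmin⟩ := PySem.Chars.find_spec hnn
        set q : Nat := (PySem.Chars.find r ['\n','-','-','-']).toNat with hqdef
        have hfind : PySem.Chars.find (h ++ '\n' :: r) ['\n','-','-','-'] = ((h.length + 1 + q : Nat) : Int) := by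
          apply pv_find_eq
          · rw [pv_drop_past]; exact hp
          · intro i hi hpre
            rcases lt_trichotomy i h.length with h2 | h2 | h2
            · exact pv_prefix_lt h r _ hh i h2 hpre
            · subst h2
              exact hr ((PySem.Chars.startswith_iff r _).2 ((pv_prefix_at h r _).1 hpre))
            · have hj : i = h.length + 1 + (i - h.length - 1) := by omega
              rw [hj, pv_drop_past] at hpre
              exact hmin _ (by omega) hpre
        rw [hfind, if_neg (by omega : ((h.length + 1 + q : Nat) : Int) ≠ -1), if_neg hq]
        rw [PySem.Chars.slice_eq_listSlice, PySem.Chars.slice_eq_listSlice,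
          (by push_cast; ring : ((h.length + 1 + q : Nat) : Int) + 1 = ((h.length + 1 + (q + 1) : Nat) : Int)),
          PySem.List.slice_from_natCast,
          (by omega : PySem.Chars.find r ['\n','-','-','-'] + 1 = ((q + 1 : Nat) : Int)),
          PySem.List.slice_from_natCast,
          (by omega : h.length + 1 + (q + 1) = h.length + 1 + (q + 1)), pv_drop_past]

theorem pv_main : ∀ (n : Nat) (cs : List Char), cs.length ≤ n → pvExtractA cs = pvExtractB cs := by
  intro n
  induction n with
  | zero =>
    intro cs hl
    have : cs = [] := by cases cs <;> simp_all
    subst this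
    decide
  | succ n ih =>
    intro cs hl
    by_cases hmem : '\n' ∈ cs
    · -- split cs at its first newline
      have hd : cs.dropWhile (fun c => c != '\n') ≠ [] := by
        intro he
        have := (List.dropWhile_eq_nil_iff).1 he '\n' hmem
        simp at this
      set h := cs.takeWhile (fun c => c != '\n') with hhdef
      set d := cs.dropWhile (fun c => c != '\n') with hddef
      have hhead : d.head hd = '\n' := by
        have := List.head_dropWhile_not (fun c => c != '\n') hd
        simpa using this
      have hcs : cs = h ++ '\n' :: d.tail := by
        rw [← hhead]
        rw [List.cons_head_tail hd]
        exact (List.takeWhile_append_dropWhile).symm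
      have hhnl : '\n' ∉ h := by
        intro hm
        have := List.mem_takeWhile_imp hm
        simp at this
      have hlen : (d.tail).length ≤ n := by
        have h2 : cs.length = h.length + (d.tail.length + 1) := by
          rw [hcs]; simp
        omega
      rw [hcs, pvA_step h d.tail hhnl, pvB_step h d.tail hhnl]
      by_cases hsw : PySem.Chars.startswith h ['-','-','-']
      · rw [if_pos hsw, if_pos hsw]
      · rw [if_neg hsw, if_neg hsw]
        exact ih d.tail hlen
    · -- no newline: a single line
      rw [pvExtractA, pv_splitOn_eq_lines, pvLines_no_nl cs hmem]
      simp only [pvFirstIdx]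
      by_cases hsw : PySem.Chars.startswith cs ['-','-','-']
      · rw [if_pos hsw]
        rw [pvExtractB, if_pos hsw]
        show PySem.Chars.join ['\n'] (PySem.List.slice [cs] (some ((0 : Nat) : Int)) none) = cs
        rw [PySem.List.slice_from_natCast, List.drop_zero, PySem.Chars.join_singleton]
      · rw [if_neg hsw]
        have hfind : PySem.Chars.find cs ['\n','-','-','-'] = -1 := by
          apply pv_find_neg
          intro i hp
          exact hmem ((List.drop_suffix i cs).subset (hp.subset List.mem_cons_self))
        rw [pvExtractB, if_neg hsw, hfind, if_pos rfl]

-- ===== VERDICT (by name: the statement is the Claim_ definition above) =====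
theorem extract_diff_py_spec : Claim_equal_extract_diff_py := by
  intro response _
  unfold Spec_extract_diff_py extract_diff_py extract_diff_py_alt
  rw [pv_main response.toList.length response.toList le_rfl]
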